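-- pv_equiv track=rewrite | github.com/edwcrtn/new-doss-othello | DERNIERE_VERSION.py | pionsprisb
-- ===== SOURCE A (Python) =====
-- def pionsprisb(lw,lb,coup,j,a=2,b=1):
--     case = coup
--     if case+j*a not in range(64):
--         return None
--     if case+j*a not in lw:
--         if case+j*a not in lb:
--             return None
--     if case+j*a in lb:
--         return b
--     else:
--         a+=1
--         b+=1
--         return(pionsprisb(lw,lb,coup,j,a,b))
-- ===== SOURCE B (Python) =====
-- def pionsprisb(lw, lb, coup, j, a=2, b=1):
--     t = 0
--     while True:
--         pos = coup + j * (a + t)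
--         if pos < 0 or pos > 63 or (pos not in lw and pos not in lb):
--             return None
--         if pos in lb:
--             return b + t
--         t += 1
-- ===== Notes on version B (the rewrite author's own statement) =====
-- stated objective: idiomatic
-- what changed: Replaces the tail recursion carrying two incremented accumulators (a,b) with a flat while-loop over a single step counter t (positions coup+j*(a+t)), returning b+t at the first black cell.
import Mathlib
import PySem

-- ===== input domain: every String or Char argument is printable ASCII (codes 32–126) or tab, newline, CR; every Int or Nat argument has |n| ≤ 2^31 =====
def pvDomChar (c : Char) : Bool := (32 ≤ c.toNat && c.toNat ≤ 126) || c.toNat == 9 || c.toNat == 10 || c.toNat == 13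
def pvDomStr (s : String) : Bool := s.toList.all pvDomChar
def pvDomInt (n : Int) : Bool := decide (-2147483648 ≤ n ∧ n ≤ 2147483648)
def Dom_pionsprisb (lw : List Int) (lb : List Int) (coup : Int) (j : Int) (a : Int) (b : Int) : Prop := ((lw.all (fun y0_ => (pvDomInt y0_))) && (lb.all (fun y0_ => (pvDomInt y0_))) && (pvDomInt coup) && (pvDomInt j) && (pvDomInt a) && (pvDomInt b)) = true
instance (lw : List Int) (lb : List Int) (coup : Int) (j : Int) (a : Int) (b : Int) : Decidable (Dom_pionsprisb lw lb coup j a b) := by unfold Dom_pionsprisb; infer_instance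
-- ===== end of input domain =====

-- B replaces A's tail recursion carrying accumulators (a,b) with a flat loop over a
-- single step counter t, returning b+t at the first black cell (idiomatic rewrite).


-- ===== PORT A =====
-- A's recursion is not structurally decreasing (j = 0 can loop forever in Python);
-- the fuel only makes it total: 200 ≥ the ≤ 65 steps any terminating run of A takes.
def pionsprisbGo (lw : List Int) (lb : List Int) (coup : Int) (j : Int) :
    Nat → Int → Int → Option Int
  | 0, _, _ => none
  | fuel + 1, a, b =>
    if ¬ (0 ≤ coup + j * a ∧ coup + j * a < 64) then none
    else if coup + j * a ∉ lw ∧ coup + j * a ∉ lb then none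
    else if coup + j * a ∈ lb then some b
    else pionsprisbGo lw lb coup j fuel (a + 1) (b + 1)

def pionsprisb (lw : List Int) (lb : List Int) (coup : Int) (j : Int) (a : Int) (b : Int) : Option Int :=
  pionsprisbGo lw lb coup j 200 a b

-- ===== PORT B =====
-- Source B's while-loop over the step counter t; same totality fuel as A's port.
def pionsprisbLoop (lw : List Int) (lb : List Int) (coup : Int) (j : Int) (a : Int) (b : Int) :
    Nat → Int → Option Int
  | 0, _ => none
  | fuel + 1, t =>
    let pos := coup + j * (a + t)
    if pos < 0 ∨ pos > 63 ∨ (pos ∉ lw ∧ pos ∉ lb) then none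
    else if pos ∈ lb then some (b + t)
    else pionsprisbLoop lw lb coup j a b fuel (t + 1)

def pionsprisb_alt (lw : List Int) (lb : List Int) (coup : Int) (j : Int) (a : Int) (b : Int) : Option Int :=
  pionsprisbLoop lw lb coup j a b 200 0

-- ===== PRECONDITION & SPEC =====
-- Pre_ excludes exactly the inputs where Python A recurses forever (RecursionError):
-- j = 0 with a white, non-black in-range cell at coup (B's loop also never returns there).
def Pre_pionsprisb (lw : List Int) (lb : List Int) (coup : Int) (j : Int) (a : Int) (b : Int) : Prop :=
  ¬ (j = 0 ∧ 0 ≤ coup + j * a ∧ coup + j * a < 64 ∧ coup + j * a ∈ lw ∧ coup + j * a ∉ lb)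
instance (lw : List Int) (lb : List Int) (coup : Int) (j : Int) (a : Int) (b : Int) : Decidable (Pre_pionsprisb lw lb coup j a b) := by unfold Pre_pionsprisb; infer_instance

def pvWitness_pionsprisb : List Int × List Int × Int × Int × Int × Int := ([10, 17], [24], 3, 7, 1, 1)

def Spec_pionsprisb (lw : List Int) (lb : List Int) (coup : Int) (j : Int) (a : Int) (b : Int) (out : Option Int) : Prop := out = pionsprisb_alt lw lb coup j a b
instance (lw : List Int) (lb : List Int) (coup : Int) (j : Int) (a : Int) (b : Int) (out : Option Int) : Decidable (Spec_pionsprisb lw lb coup j a b out) := by unfold Spec_pionsprisb; infer_instance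

-- ===== CLAIM (what is proved, stated in full; the proofs are below) =====
def Claim_equal_pionsprisb : Prop := ∀ (lw : List Int) (lb : List Int) (coup : Int) (j : Int) (a : Int) (b : Int), Dom_pionsprisb lw lb coup j a b → Pre_pionsprisb lw lb coup j a b → Spec_pionsprisb lw lb coup j a b (pionsprisb lw lb coup j a b)

-- ===== LEMMAS AND PROOFS =====
lemma go_eq_loop (lw lb : List Int) (coup j a b : Int) :
    ∀ (fuel : Nat) (t : Int),
      pionsprisbGo lw lb coup j fuel (a + t) (b + t) = pionsprisbLoop lw lb coup j a b fuel t := by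
  intro fuel
  induction fuel with
  | zero => intro t; rfl
  | succ n ih =>
    intro t
    simp only [pionsprisbGo, pionsprisbLoop]
    by_cases hr : 0 ≤ coup + j * (a + t) ∧ coup + j * (a + t) < 64
    · rw [if_neg (not_not_intro hr)]
      by_cases hw : coup + j * (a + t) ∉ lw ∧ coup + j * (a + t) ∉ lb
      · rw [if_pos hw, if_pos (Or.inr (Or.inr hw))]
      · have hnc : ¬ (coup + j * (a + t) < 0 ∨ coup + j * (a + t) > 63 ∨
            (coup + j * (a + t) ∉ lw ∧ coup + j * (a + t) ∉ lb)) := by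
          rintro (h | h | h) <;> first | omega | exact hw h
        rw [if_neg hw, if_neg hnc]
        by_cases hb : coup + j * (a + t) ∈ lb
        · rw [if_pos hb, if_pos hb]
        · rw [if_neg hb, if_neg hb]
          have h := ih (t + 1)
          ring_nf at h ⊢
          exact h
    · rw [if_pos hr]
      rcases (by omega : coup + j * (a + t) < 0 ∨ coup + j * (a + t) > 63) with h | h
      · rw [if_pos (Or.inl h)]
      · rw [if_pos (Or.inr (Or.inl h))]

-- ===== VERDICT (by name: the statement is the Claim_ definition above) =====
theorem pionsprisb_spec : Claim_equal_pionsprisb := by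
  intro lw lb coup j a b _ _
  unfold Spec_pionsprisb pionsprisb pionsprisb_alt
  simpa using go_eq_loop lw lb coup j a b 200 0
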